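-- pv_equiv track=rewrite | github.com/libretro/blastem | cpu_dsl.py | parseFlagUpdate
-- ===== SOURCE A (Python) =====
-- def parseFlagUpdate(flagString):
-- 	last = ''
-- 	autoUpdate = set()
-- 	explicit = {}
-- 	for c in flagString:
-- 		if c.isdigit():
-- 			if last.isalpha():
-- 				num = int(c)
-- 				if num > 1:
-- 					raise Exception(c + ' is not a valid digit for update_flags')
-- 				explicit[last] = num
-- 				last = c
-- 			else:
-- 				raise Exception('Digit must follow flag letter in update_flags')
-- 		else:
-- 			if last.isalpha():
-- 				autoUpdate.add(last)
-- 			last = c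
-- 	if last.isalpha():
-- 		autoUpdate.add(last)
-- 	return (autoUpdate, explicit)
-- ===== SOURCE B (Python) =====
-- def parseFlagUpdate(flagString):
-- 	autoUpdate = set()
-- 	explicit = {}
-- 	i = 0
-- 	n = len(flagString)
-- 	while i < n:
-- 		c = flagString[i]
-- 		if c.isdigit():
-- 			raise Exception('Digit must follow flag letter in update_flags')
-- 		if c.isalpha():
-- 			if i + 1 < n and flagString[i + 1].isdigit():
-- 				d = flagString[i + 1]
-- 				num = int(d)
-- 				if num > 1:
-- 					raise Exception(d + ' is not a valid digit for update_flags')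
-- 				explicit[c] = num
-- 				i += 2
-- 				continue
-- 			autoUpdate.add(c)
-- 		i += 1
-- 	return (autoUpdate, explicit)
-- ===== Notes on version B (the rewrite author's own statement) =====
-- stated objective: simpler
-- what changed: Replaced A's one-character-behind accumulator and its end-of-loop flush by a direct index scan with one-character lookahead: a letter is classified immediately (explicit if the next char is a digit, auto otherwise), so no pending state survives the loop.
import Mathlib
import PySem

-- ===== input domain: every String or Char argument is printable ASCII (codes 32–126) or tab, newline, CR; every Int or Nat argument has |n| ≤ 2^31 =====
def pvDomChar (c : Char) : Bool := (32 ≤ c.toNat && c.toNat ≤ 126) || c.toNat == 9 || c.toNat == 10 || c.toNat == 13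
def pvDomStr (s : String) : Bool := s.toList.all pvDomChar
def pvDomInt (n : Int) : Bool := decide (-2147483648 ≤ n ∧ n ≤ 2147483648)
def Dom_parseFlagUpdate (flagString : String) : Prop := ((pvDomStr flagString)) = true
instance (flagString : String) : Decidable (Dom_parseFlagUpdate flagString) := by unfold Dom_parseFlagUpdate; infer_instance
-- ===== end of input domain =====

-- B replaces A's one-character-behind accumulator and end-of-loop flush by an index scan with
-- one-character lookahead (objective: simpler decomposition, same cost; return value only).

-- ===== PORT A =====
-- state: (raised-flag, last, autoUpdate, explicit)
def pfaStep (st : Bool × String × PySem.Set String × PySem.Dict String Int) (c : Char) :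
    Bool × String × PySem.Set String × PySem.Dict String Int :=
  match st with
  | (err, last, autoUpdate, explicit) =>
    if err then st
    else if PySem.Chars.isdigit c then
      if PySem.Str.strIsalpha last then
        let num : Int := (PySem.Int.ofStr? (String.ofList [c])).getD 0
        if num > 1 then (true, last, autoUpdate, explicit)   -- raise (excluded by Pre_)
        else (false, String.ofList [c], autoUpdate, PySem.Dict.insert explicit last num)
      else (true, last, autoUpdate, explicit)                -- raise (excluded by Pre_)
    else
      let autoUpdate := if PySem.Str.strIsalpha last then PySem.Set.add autoUpdate last else autoUpdate
      (false, String.ofList [c], autoUpdate, explicit)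

def parseFlagUpdate (flagString : String) : List String × (List (String × Int)) :=
  match flagString.toList.foldl pfaStep (false, String.ofList [], PySem.Set.empty, PySem.Dict.empty) with
  | (_, last, autoUpdate, explicit) =>
    ((if PySem.Str.strIsalpha last then PySem.Set.add autoUpdate last else autoUpdate),
     explicit.items)

-- ===== PORT B =====
def pfbGo (cs : List Char) (autoUpdate : PySem.Set String) (explicit : PySem.Dict String Int) :
    List String × (List (String × Int)) :=
  match cs with
  | [] => (autoUpdate, explicit.items)
  | [c] =>
    if PySem.Chars.isdigit c then (autoUpdate, explicit.items)   -- raise (excluded by Pre_)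
    else if PySem.Chars.isalpha c then
      (PySem.Set.add autoUpdate (String.ofList [c]), explicit.items)   -- no lookahead: add, done
    else (autoUpdate, explicit.items)
  | c :: d :: rest' =>
    if PySem.Chars.isdigit c then (autoUpdate, explicit.items)   -- raise (excluded by Pre_)
    else if PySem.Chars.isalpha c then
      if PySem.Chars.isdigit d then
        let num : Int := (PySem.Int.ofStr? (String.ofList [d])).getD 0
        if num > 1 then (autoUpdate, explicit.items)             -- raise (excluded by Pre_)
        else pfbGo rest' autoUpdate (PySem.Dict.insert explicit (String.ofList [c]) num)
      else pfbGo (d :: rest') (PySem.Set.add autoUpdate (String.ofList [c])) explicit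
    else pfbGo (d :: rest') autoUpdate explicit
termination_by cs.length
decreasing_by all_goals simp

def parseFlagUpdate_alt (flagString : String) : List String × (List (String × Int)) :=
  pfbGo flagString.toList PySem.Set.empty PySem.Dict.empty

-- ===== PRECONDITION & SPEC =====
-- Pre_ excludes exactly the inputs on which A raises: a digit not immediately preceded by a
-- letter, or a digit other than '0'/'1' after a letter.
def pvGoodChars : Bool → List Char → Bool
  | _, [] => true
  | prevAlpha, c :: rest =>
    (if PySem.Chars.isdigit c then prevAlpha && (c == '0' || c == '1') else true)
      && pvGoodChars (PySem.Chars.isalpha c) rest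

def Pre_parseFlagUpdate (flagString : String) : Prop :=
  pvGoodChars false flagString.toList = true
instance (flagString : String) : Decidable (Pre_parseFlagUpdate flagString) := by
  unfold Pre_parseFlagUpdate; infer_instance

def pvWitness_parseFlagUpdate : String := "ab0c1 z"

def Spec_parseFlagUpdate (flagString : String) (out : List String × (List (String × Int))) : Prop :=
  out = parseFlagUpdate_alt flagString
instance (flagString : String) (out : List String × (List (String × Int))) :
    Decidable (Spec_parseFlagUpdate flagString out) := by unfold Spec_parseFlagUpdate; infer_instance

-- ===== CLAIM (what is proved, stated in full; the proofs are below) =====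
def Claim_equal_parseFlagUpdate : Prop := ∀ (flagString : String), Dom_parseFlagUpdate flagString → Pre_parseFlagUpdate flagString → Spec_parseFlagUpdate flagString (parseFlagUpdate flagString)

-- ===== LEMMAS AND PROOFS =====

def pvLastStr : Option Char → String
  | none => String.ofList []
  | some p => String.ofList [p]

def pvPrevA : Option Char → Bool
  | none => false
  | some p => PySem.Chars.isalpha p

def pvPend : Option Char → List Char
  | none => []
  | some p => if PySem.Chars.isalpha p then [p] else []

def pvFinishA (st : Bool × String × PySem.Set String × PySem.Dict String Int) :
    List String × (List (String × Int)) :=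
  match st with
  | (_, last, a, e) => ((if PySem.Str.strIsalpha last then PySem.Set.add a last else a), e.items)

lemma pvLastStr_some (p : Char) : pvLastStr (some p) = String.ofList [p] := rfl

lemma not_isdigit_of_isalpha {c : Char} (h : PySem.Chars.isalpha c = true) :
    PySem.Chars.isdigit c = false := by
  have h2 := h
  simp [PySem.Chars.isalpha, PySem.Chars.isupper, PySem.Chars.islower, Char.le_def,
    UInt32.le_iff_toNat_le] at h2
  simp [PySem.Chars.isdigit, Char.le_def, UInt32.le_iff_toNat_le]
  omega

lemma not_isalpha_of_isdigit {c : Char} (h : PySem.Chars.isdigit c = true) :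
    PySem.Chars.isalpha c = false := by
  have h2 := h
  simp [PySem.Chars.isdigit, Char.le_def, UInt32.le_iff_toNat_le] at h2
  simp [PySem.Chars.isalpha, PySem.Chars.isupper, PySem.Chars.islower, Char.le_def,
    UInt32.le_iff_toNat_le]
  omega

lemma key (n : Nat) : ∀ (cs : List Char), cs.length ≤ n →
    ∀ (prev : Option Char) (auto : PySem.Set String) (expl : PySem.Dict String Int),
    pvGoodChars (pvPrevA prev) cs = true →
    pvFinishA (cs.foldl pfaStep (false, pvLastStr prev, auto, expl))
      = pfbGo (pvPend prev ++ cs) auto expl := by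
  induction n with
  | zero =>
    intro cs hlen prev auto expl _
    have hnil : cs = [] := List.length_eq_zero_iff.mp (Nat.le_zero.mp hlen)
    subst hnil
    cases prev with
    | none => simp [pvFinishA, pfbGo, pvPend, pvLastStr, PySem.Chars.strIsalpha]
    | some p =>
      by_cases hp : PySem.Chars.isalpha p = true
      · simp [pvFinishA, pfbGo, pvPend, pvLastStr, PySem.Chars.strIsalpha, hp,
          not_isdigit_of_isalpha hp]
      · simp [pvFinishA, pfbGo, pvPend, pvLastStr, PySem.Chars.strIsalpha, hp]
  | succ n ih =>
    intro cs hlen prev auto expl hgood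
    cases cs with
    | nil =>
      cases prev with
      | none => simp [pvFinishA, pfbGo, pvPend, pvLastStr, PySem.Chars.strIsalpha]
      | some p =>
        by_cases hp : PySem.Chars.isalpha p = true
        · simp [pvFinishA, pfbGo, pvPend, pvLastStr, PySem.Chars.strIsalpha, hp,
            not_isdigit_of_isalpha hp]
        · simp [pvFinishA, pfbGo, pvPend, pvLastStr, PySem.Chars.strIsalpha, hp]
    | cons c rest =>
      by_cases hd : PySem.Chars.isdigit c = true
      · -- digit case: Pre_ forces prev alpha and c ∈ {'0','1'}
        simp only [pvGoodChars, hd, if_pos, Bool.and_eq_true] at hgood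
        obtain ⟨⟨hpa, hc01⟩, hrest⟩ := hgood
        obtain ⟨p, rfl⟩ : ∃ p, prev = some p := by
          cases prev with
          | none => simp [pvPrevA] at hpa
          | some p => exact ⟨p, rfl⟩
        have hp : PySem.Chars.isalpha p = true := hpa
        have hca : PySem.Chars.isalpha c = false := not_isalpha_of_isdigit hd
        have hnum : (PySem.Int.ofChars? [c]).getD 0 ≤ 1 := by
          rcases Bool.or_eq_true _ _ |>.mp hc01 with h | h
          · have hc : c = '0' := by simpa using h
            subst hc; decide
          · have hc : c = '1' := by simpa using h
            subst hc; decide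
        have hstep : pfaStep (false, pvLastStr (some p), auto, expl) c
            = (false, String.ofList [c], auto,
               PySem.Dict.insert expl (String.ofList [p]) ((PySem.Int.ofStr? (String.ofList [c])).getD 0)) := by
          simp [pfaStep, hd, hp, pvLastStr, PySem.Chars.strIsalpha]
          omega
        have hrec := ih rest (by simpa using Nat.le_of_succ_le_succ hlen) (some c) auto
          (PySem.Dict.insert expl (String.ofList [p]) ((PySem.Int.ofStr? (String.ofList [c])).getD 0))
          (by simpa [pvPrevA] using hrest)
        rw [List.foldl_cons, hstep]
        simp only [pvLastStr_some, pvPend, hca, Bool.false_eq_true, if_false, List.nil_append] at hrec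
        rw [hrec]
        simp [pvPend, hp, pfbGo, not_isdigit_of_isalpha hp, hd]
        omega
      · -- non-digit case
        simp only [pvGoodChars, hd, Bool.and_eq_true, if_neg, Bool.not_eq_true] at hgood
        have hrest := hgood.2
        have hstep : pfaStep (false, pvLastStr prev, auto, expl) c
            = (false, String.ofList [c],
               (if pvPrevA prev then PySem.Set.add auto (pvLastStr prev) else auto), expl) := by
          cases prev with
          | none => simp [pfaStep, hd, pvLastStr, pvPrevA, PySem.Chars.strIsalpha]
          | some p => simp [pfaStep, hd, pvLastStr, pvPrevA, PySem.Chars.strIsalpha]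
        have hrec := ih rest (by simpa using Nat.le_of_succ_le_succ hlen) (some c)
          (if pvPrevA prev then PySem.Set.add auto (pvLastStr prev) else auto) expl
          (by simpa [pvPrevA] using hrest)
        rw [List.foldl_cons, hstep]
        simp only [pvLastStr_some] at hrec
        rw [hrec]
        -- now reduce the B side
        cases prev with
        | none =>
          simp only [pvPrevA, pvPend, Bool.false_eq_true, if_false, List.nil_append]
          by_cases hca : PySem.Chars.isalpha c = true
          · simp [pvPend, hca]
          · cases rest with
            | nil => simp [pvPend, hca, pfbGo, hd]
            | cons e rest2 => simp [pvPend, hca, pfbGo, hd]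
        | some p =>
          by_cases hp : PySem.Chars.isalpha p = true
          · simp only [pvPrevA, hp, if_true, pvPend, pvLastStr, List.cons_append, List.nil_append]
            by_cases hca : PySem.Chars.isalpha c = true
            · simp [pfbGo, not_isdigit_of_isalpha hp, hp, hd, hca, pvPend]
            · cases rest with
              | nil => simp [pfbGo, not_isdigit_of_isalpha hp, hp, hd, hca, pvPend]
              | cons e rest2 => simp [pfbGo, not_isdigit_of_isalpha hp, hp, hd, hca, pvPend]
          · simp only [pvPrevA, pvPend, hp, Bool.false_eq_true, if_false, List.nil_append]
            by_cases hca : PySem.Chars.isalpha c = true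
            · simp [pvPend, hca, hp]
            · cases rest with
              | nil => simp [pvPend, hca, hp, pfbGo, hd]
              | cons e rest2 => simp [pvPend, hca, hp, pfbGo, hd]

-- ===== VERDICT (by name: the statement is the Claim_ definition above) =====
theorem parseFlagUpdate_spec : Claim_equal_parseFlagUpdate := by
  intro s _ hpre
  unfold Spec_parseFlagUpdate parseFlagUpdate parseFlagUpdate_alt
  have h := key s.toList.length s.toList (le_refl _) none PySem.Set.empty PySem.Dict.empty
    (by simpa [pvPrevA, Pre_parseFlagUpdate] using hpre)
  simpa [pvFinishA, pvLastStr, pvPend] using h
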